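-- pv_equiv track=rewrite | github.com/Xuanma0/Project-Be-your-eyes | Gateway/scripts/verify_contracts.py | _compare_lock
-- ===== SOURCE A (Python) =====
-- from typing import Any
--
-- def _compare_lock(current: dict[str, dict[str, Any]], lock: dict[str, Any]) -> list[str]:
--     errors: list[str] = []
--     locked_versions = lock.get("versions")
--     locked_versions = locked_versions if isinstance(locked_versions, dict) else {}
--
--     current_keys = set(current.keys())
--     lock_keys = set(str(key) for key in locked_versions.keys())
--     missing = sorted(lock_keys - current_keys)
--     extra = sorted(current_keys - lock_keys)
--     if missing:
--         errors.append(f"missing contract files for versions: {', '.join(missing)}")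
--     if extra:
--         errors.append(f"new contract files not in lock: {', '.join(extra)}")
--
--     shared = sorted(current_keys & lock_keys)
--     for version in shared:
--         cur = current.get(version, {})
--         locked_raw = locked_versions.get(version)
--         locked = locked_raw if isinstance(locked_raw, dict) else {}
--         cur_sha = str(cur.get("sha256", ""))
--         lock_sha = str(locked.get("sha256", ""))
--         if cur_sha != lock_sha:
--             errors.append(
--                 f"{version}: sha256 mismatch current={cur_sha or '<empty>'} lock={lock_sha or '<empty>'}"
--             )
--         cur_path = str(cur.get("path", ""))
--         lock_path = str(locked.get("path", ""))
--         if cur_path != lock_path: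
--             errors.append(
--                 f"{version}: path mismatch current={cur_path or '<empty>'} lock={lock_path or '<empty>'}"
--             )
--     return errors
-- ===== SOURCE B (Python) =====
-- from typing import Any
--
--
-- def _shared_msgs(current: dict[str, dict[str, Any]], locked_versions: dict[str, Any], key: str) -> list[str]:
--     cur = current.get(key, {})
--     locked_raw = locked_versions.get(key)
--     locked = locked_raw if isinstance(locked_raw, dict) else {}
--     msgs: list[str] = []
--     for field in ("sha256", "path"):
--         cur_val = str(cur.get(field, ""))
--         lock_val = str(locked.get(field, ""))
--         if cur_val != lock_val:
--             msgs.append(f"{key}: {field} mismatch current={cur_val or '<empty>'} lock={lock_val or '<empty>'}")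
--     return msgs
--
--
-- def _compare_lock(current: dict[str, dict[str, Any]], lock: dict[str, Any]) -> list[str]:
--     locked_versions = lock.get("versions")
--     locked_versions = locked_versions if isinstance(locked_versions, dict) else {}
--     cs = sorted(set(current))
--     ls = sorted({str(k) for k in locked_versions})
--     # two-pointer merge of the two sorted, deduplicated key lists
--     missing: list[str] = []
--     extra: list[str] = []
--     mismatches: list[str] = []
--     i = j = 0
--     while i < len(cs) or j < len(ls):
--         if i >= len(cs):
--             missing.append(ls[j]); j += 1
--         elif j >= len(ls):
--             extra.append(cs[i]); i += 1
--         elif cs[i] < ls[j]: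
--             extra.append(cs[i]); i += 1
--         elif ls[j] < cs[i]:
--             missing.append(ls[j]); j += 1
--         else:
--             mismatches.extend(_shared_msgs(current, locked_versions, cs[i]))
--             i += 1; j += 1
--     errors: list[str] = []
--     if missing:
--         errors.append(f"missing contract files for versions: {', '.join(missing)}")
--     if extra:
--         errors.append(f"new contract files not in lock: {', '.join(extra)}")
--     return errors + mismatches
-- ===== Notes on version B (the rewrite author's own statement) =====
-- stated objective: alternative
-- what changed: A computes three sorted set operations (lock-current, current-lock, intersection) and then loops over the intersection; B sorts the two deduplicated key lists separately and classifies keys with a single two-pointer merge pass over the sorted lists, emitting missing/extra keys and the per-shared-key field comparisons during the merge.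
import Mathlib
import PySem

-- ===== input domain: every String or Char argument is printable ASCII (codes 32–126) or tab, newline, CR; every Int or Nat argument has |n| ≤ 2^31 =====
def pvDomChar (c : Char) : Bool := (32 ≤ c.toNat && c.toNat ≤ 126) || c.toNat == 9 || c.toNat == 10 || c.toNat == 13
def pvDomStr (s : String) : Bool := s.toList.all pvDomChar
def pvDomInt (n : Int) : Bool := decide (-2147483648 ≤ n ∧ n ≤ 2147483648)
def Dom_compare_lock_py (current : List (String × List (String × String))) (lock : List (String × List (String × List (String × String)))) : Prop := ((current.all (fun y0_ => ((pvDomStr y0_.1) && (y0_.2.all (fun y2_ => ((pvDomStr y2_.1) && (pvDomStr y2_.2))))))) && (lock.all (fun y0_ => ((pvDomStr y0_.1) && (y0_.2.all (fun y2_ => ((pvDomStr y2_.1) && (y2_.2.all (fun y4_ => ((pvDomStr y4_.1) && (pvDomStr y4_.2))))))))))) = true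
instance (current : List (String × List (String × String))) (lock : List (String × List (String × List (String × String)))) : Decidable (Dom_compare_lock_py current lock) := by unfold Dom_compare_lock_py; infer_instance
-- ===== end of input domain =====

-- B replaces A's three sorted set operations (lock−current, current−lock, current∩lock, plus a
-- separate loop over the intersection) by a two-pointer MERGE of the two independently
-- sorted, deduplicated key lists, classifying each key and comparing the fields of shared keys
-- during the merge; objective: alternative algorithm, same asymptotic cost.

-- ===== PORT A =====
-- Python `s or '<empty>'` on a string (used by both Pythons inside their f-strings)
def pvOrEmpty (s : String) : String := if s = "" then "<empty>" else s

def compare_lock_py (current : List (String × List (String × String))) (lock : List (String × List (String × List (String × String)))) : List String :=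
  -- locked_versions = lock.get("versions"); by the declared types a present value is a dict (isinstance keeps it), an absent one becomes {}
  let locked_versions := ((PySem.Dict.mk lock).get? "versions").getD []
  let current_keys : PySem.Set String := PySem.Set.ofList ((PySem.Dict.mk current).keys)
  -- set(str(key) for key in locked_versions.keys()); str(key) is the identity on the String keys of the typed domain
  let lock_keys : PySem.Set String := PySem.Set.ofList ((PySem.Dict.mk locked_versions).keys)
  let missing := PySem.List.sorted (PySem.Set.diff lock_keys current_keys) (fun x => x) false
  let extra := PySem.List.sorted (PySem.Set.diff current_keys lock_keys) (fun x => x) false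
  let errors : List String := []
  let errors := if missing ≠ [] then errors ++ ["missing contract files for versions: " ++ PySem.Str.join ", " missing] else errors
  let errors := if extra ≠ [] then errors ++ ["new contract files not in lock: " ++ PySem.Str.join ", " extra] else errors
  let shared := PySem.List.sorted (PySem.Set.inter current_keys lock_keys) (fun x => x) false
  shared.foldl (fun errors version =>
    let cur := (PySem.Dict.mk current).getD version []
    -- locked_raw = locked_versions.get(version): a dict whenever present (isinstance keeps it), None becomes {}
    let locked := ((PySem.Dict.mk locked_versions).get? version).getD []
    let cur_sha := (PySem.Dict.mk cur).getD "sha256" ""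
    let lock_sha := (PySem.Dict.mk locked).getD "sha256" ""
    let errors := if cur_sha ≠ lock_sha then errors ++ [version ++ ": sha256 mismatch current=" ++ pvOrEmpty cur_sha ++ " lock=" ++ pvOrEmpty lock_sha] else errors
    let cur_path := (PySem.Dict.mk cur).getD "path" ""
    let lock_path := (PySem.Dict.mk locked).getD "path" ""
    if cur_path ≠ lock_path then errors ++ [version ++ ": path mismatch current=" ++ pvOrEmpty cur_path ++ " lock=" ++ pvOrEmpty lock_path] else errors) errors

-- ===== PORT B =====
-- Source B's _shared_msgs: the `for field in ("sha256", "path")` loop for one shared key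
def pvSharedMsgs (current : List (String × List (String × String))) (locked_versions : List (String × List (String × String))) (key : String) : List String :=
  let cur := (PySem.Dict.mk current).getD key []
  -- locked_raw = locked_versions.get(key): a dict whenever present (isinstance keeps it), None becomes {}
  let locked := ((PySem.Dict.mk locked_versions).get? key).getD []
  (["sha256", "path"]).foldl (fun msgs field =>
    let cur_val := (PySem.Dict.mk cur).getD field ""
    let lock_val := (PySem.Dict.mk locked).getD field ""
    if cur_val ≠ lock_val then msgs ++ [key ++ ": " ++ field ++ " mismatch current=" ++ pvOrEmpty cur_val ++ " lock=" ++ pvOrEmpty lock_val] else msgs) []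

-- Source B's two-pointer while loop: i/j advance = consuming the two sorted key lists;
-- the three growing result lists are the accumulator triple
def pvMerge (current : List (String × List (String × String))) (locked_versions : List (String × List (String × String))) : List String → List String → List String × List String × List String → List String × List String × List String
  | [], [], acc => acc
  | [], l :: ls, acc => pvMerge current locked_versions [] ls (acc.1 ++ [l], acc.2.1, acc.2.2)
  | c :: cs, [], acc => pvMerge current locked_versions cs [] (acc.1, acc.2.1 ++ [c], acc.2.2)
  | c :: cs, l :: ls, acc =>
    if c < l then pvMerge current locked_versions cs (l :: ls) (acc.1, acc.2.1 ++ [c], acc.2.2)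
    else if l < c then pvMerge current locked_versions (c :: cs) ls (acc.1 ++ [l], acc.2.1, acc.2.2)
    else pvMerge current locked_versions cs ls (acc.1, acc.2.1, acc.2.2 ++ pvSharedMsgs current locked_versions c)
termination_by cs ls _ => cs.length + ls.length

def compare_lock_py_alt (current : List (String × List (String × String))) (lock : List (String × List (String × List (String × String)))) : List String :=
  let locked_versions := ((PySem.Dict.mk lock).get? "versions").getD []
  -- sorted(set(current)) and sorted({str(k) for k in locked_versions}); str is the identity on String keys
  let cs := PySem.List.sorted (PySem.Set.ofList ((PySem.Dict.mk current).keys)) (fun x => x) false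
  let ls := PySem.List.sorted (PySem.Set.ofList ((PySem.Dict.mk locked_versions).keys)) (fun x => x) false
  let r := pvMerge current locked_versions cs ls ([], [], [])
  let errors : List String := []
  let errors := if r.1 ≠ [] then errors ++ ["missing contract files for versions: " ++ PySem.Str.join ", " r.1] else errors
  let errors := if r.2.1 ≠ [] then errors ++ ["new contract files not in lock: " ++ PySem.Str.join ", " r.2.1] else errors
  errors ++ r.2.2

-- ===== PRECONDITION & SPEC =====
def Spec_compare_lock_py (current : List (String × List (String × String))) (lock : List (String × List (String × List (String × String)))) (out : List String) : Prop := out = compare_lock_py_alt current lock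
instance (current : List (String × List (String × String))) (lock : List (String × List (String × List (String × String)))) (out : List String) : Decidable (Spec_compare_lock_py current lock out) := by unfold Spec_compare_lock_py; infer_instance

-- ===== CLAIM (what is proved, stated in full; the proofs are below) =====
def Claim_equal_compare_lock_py : Prop := ∀ (current : List (String × List (String × String))) (lock : List (String × List (String × List (String × String)))), Dom_compare_lock_py current lock → Spec_compare_lock_py current lock (compare_lock_py current lock)

-- ===== LEMMAS AND PROOFS =====

-- B's two-pointer merge of two strictly increasing lists appends the three filters to its accumulator
theorem pv_merge_eq (current locked_versions : List (String × List (String × String))) :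
    ∀ (cs ls : List String) (acc : List String × List String × List String),
    cs.Pairwise (· < ·) → ls.Pairwise (· < ·) →
    pvMerge current locked_versions cs ls acc
      = (acc.1 ++ ls.filter (fun k => !cs.contains k),
         acc.2.1 ++ cs.filter (fun k => !ls.contains k),
         acc.2.2 ++ (cs.filter (fun k => ls.contains k)).flatMap (pvSharedMsgs current locked_versions)) := by
  intro cs ls acc
  induction cs, ls, acc using pvMerge.induct current locked_versions with
  | case1 acc => simp [pvMerge]
  | case2 l ls acc ih =>
    intro _ hl
    rw [pvMerge, ih List.Pairwise.nil (List.Pairwise.of_cons hl)]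
    simp
  | case3 c cs acc ih =>
    intro hc _
    rw [pvMerge, ih (List.Pairwise.of_cons hc) List.Pairwise.nil]
    simp
  | case4 c cs l ls acc hlt ih =>
    intro hc hl
    rw [pvMerge, if_pos hlt, ih (List.Pairwise.of_cons hc) hl]
    have hcnot : ∀ m, m ∈ l :: ls → ¬ (m = c) := by
      intro m hm he
      rcases List.mem_cons.mp hm with h | h
      · rw [he] at h; rw [h] at hlt; exact lt_irrefl _ hlt
      · have hlm := (List.pairwise_cons.mp hl).1 m h
        rw [he] at hlm; exact lt_irrefl _ (lt_trans hlt hlm)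
    have hne : ¬ c = l := fun he => hcnot c (by rw [he]; exact List.mem_cons_self ..) rfl
    have hnin : c ∉ ls := fun h => hcnot c (List.mem_cons_of_mem _ h) rfl
    have h1 : (l :: ls).filter (fun k => !(c :: cs).contains k)
        = (l :: ls).filter (fun k => !cs.contains k) := by
      apply List.filter_congr
      intro m hm
      simp [fun h => hcnot m hm h]
    have h2' : (c :: cs).filter (fun k => !(l :: ls).contains k)
        = c :: cs.filter (fun k => !(l :: ls).contains k) := by
      rw [List.filter_cons]; simp [hne, hnin]
    have h3' : (c :: cs).filter (fun k => (l :: ls).contains k)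
        = cs.filter (fun k => (l :: ls).contains k) := by
      rw [List.filter_cons]; simp [hne, hnin]
    rw [h1, h2', h3']
    simp
  | case5 c cs l ls acc hnlt hlt ih =>
    intro hc hl
    rw [pvMerge, if_neg hnlt, if_pos hlt, ih hc (List.Pairwise.of_cons hl)]
    have hlnot : ∀ m, m ∈ c :: cs → ¬ (m = l) := by
      intro m hm he
      rcases List.mem_cons.mp hm with h | h
      · rw [he] at h; rw [h] at hlt; exact lt_irrefl _ hlt
      · have hcm := (List.pairwise_cons.mp hc).1 m h
        rw [he] at hcm; exact lt_irrefl _ (lt_trans hlt hcm)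
    have hne : ¬ l = c := fun he => hlnot l (by rw [he]; exact List.mem_cons_self ..) rfl
    have hnin : l ∉ cs := fun h => hlnot l (List.mem_cons_of_mem _ h) rfl
    have h1 : (c :: cs).filter (fun k => !(l :: ls).contains k)
        = (c :: cs).filter (fun k => !ls.contains k) := by
      apply List.filter_congr
      intro m hm
      simp [fun h => hlnot m hm h]
    have h1' : (c :: cs).filter (fun k => (l :: ls).contains k)
        = (c :: cs).filter (fun k => ls.contains k) := by
      apply List.filter_congr
      intro m hm
      simp [fun h => hlnot m hm h]
    have h2' : (l :: ls).filter (fun k => !(c :: cs).contains k)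
        = l :: ls.filter (fun k => !(c :: cs).contains k) := by
      rw [List.filter_cons]; simp [hne, hnin]
    rw [h1, h1', h2']
    simp
  | case6 c cs l ls acc hnlt hnlt' ih =>
    intro hc hl
    have hceq : c = l := le_antisymm (not_lt.mp hnlt') (not_lt.mp hnlt)
    subst hceq
    rw [pvMerge, if_neg hnlt, if_neg hnlt', ih (List.Pairwise.of_cons hc) (List.Pairwise.of_cons hl)]
    have hnotc : ∀ m, m ∈ cs → ¬ (m = c) := by
      intro m hm he
      have h := (List.pairwise_cons.mp hc).1 m hm
      rw [he] at h; exact lt_irrefl _ h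
    have hnotl : ∀ m, m ∈ ls → ¬ (m = c) := by
      intro m hm he
      have h := (List.pairwise_cons.mp hl).1 m hm
      rw [he] at h; exact lt_irrefl _ h
    have h1 : ls.filter (fun k => !(c :: cs).contains k)
        = ls.filter (fun k => !cs.contains k) := by
      apply List.filter_congr
      intro m hm
      simp [fun h => hnotl m hm h]
    have h2 : cs.filter (fun k => !(c :: ls).contains k)
        = cs.filter (fun k => !ls.contains k) := by
      apply List.filter_congr
      intro m hm
      simp [fun h => hnotc m hm h]
    have h3 : cs.filter (fun k => (c :: ls).contains k)
        = cs.filter (fun k => ls.contains k) := by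
      apply List.filter_congr
      intro m hm
      simp [fun h => hnotc m hm h]
    have h4 : (c :: ls).filter (fun k => !(c :: cs).contains k)
        = ls.filter (fun k => !(c :: cs).contains k) := by
      rw [List.filter_cons]; simp
    have h5 : (c :: cs).filter (fun k => !(c :: ls).contains k)
        = cs.filter (fun k => !(c :: ls).contains k) := by
      rw [List.filter_cons]; simp
    have h6 : (c :: cs).filter (fun k => (c :: ls).contains k)
        = c :: cs.filter (fun k => (c :: ls).contains k) := by
      rw [List.filter_cons]; simp
    rw [h4, h1, h5, h2, h6, h3]
    simp [List.flatMap_cons]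

-- A's loop body appends exactly pvSharedMsgs of the key
theorem pv_stepA_eq (current : List (String × List (String × String))) (lv : List (String × List (String × String))) (errors : List String) (version : String) :
    (let cur := (PySem.Dict.mk current).getD version []
     let locked := ((PySem.Dict.mk lv).get? version).getD []
     let cur_sha := (PySem.Dict.mk cur).getD "sha256" ""
     let lock_sha := (PySem.Dict.mk locked).getD "sha256" ""
     let errors := if cur_sha ≠ lock_sha then errors ++ [version ++ ": sha256 mismatch current=" ++ pvOrEmpty cur_sha ++ " lock=" ++ pvOrEmpty lock_sha] else errors
     let cur_path := (PySem.Dict.mk cur).getD "path" ""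
     let lock_path := (PySem.Dict.mk locked).getD "path" ""
     if cur_path ≠ lock_path then errors ++ [version ++ ": path mismatch current=" ++ pvOrEmpty cur_path ++ " lock=" ++ pvOrEmpty lock_path] else errors)
    = errors ++ pvSharedMsgs current lv version := by
  simp only [pvSharedMsgs, List.foldl_cons, List.foldl_nil]
  split_ifs <;> simp_all [String.append_assoc]

-- A's shared loop extends errors by the per-key messages
theorem pv_foldA (current : List (String × List (String × String))) (lv : List (String × List (String × String))) (l : List String) (errors : List String) :
    l.foldl (fun errors version =>
      let cur := (PySem.Dict.mk current).getD version []
      let locked := ((PySem.Dict.mk lv).get? version).getD []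
      let cur_sha := (PySem.Dict.mk cur).getD "sha256" ""
      let lock_sha := (PySem.Dict.mk locked).getD "sha256" ""
      let errors := if cur_sha ≠ lock_sha then errors ++ [version ++ ": sha256 mismatch current=" ++ pvOrEmpty cur_sha ++ " lock=" ++ pvOrEmpty lock_sha] else errors
      let cur_path := (PySem.Dict.mk cur).getD "path" ""
      let lock_path := (PySem.Dict.mk locked).getD "path" ""
      if cur_path ≠ lock_path then errors ++ [version ++ ": path mismatch current=" ++ pvOrEmpty cur_path ++ " lock=" ++ pvOrEmpty lock_path] else errors) errors
    = errors ++ l.flatMap (pvSharedMsgs current lv) := by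
  induction l generalizing errors with
  | nil => simp
  | cons k t ih => rw [List.foldl_cons, pv_stepA_eq, ih, List.flatMap_cons, List.append_assoc]

-- sorted of a Set carved out of a base set = the matching filter of the base's sorted list
theorem pv_sorted_filter (base : PySem.Set String) (hbase : base.Nodup)
    (S : PySem.Set String) (hSn : S.Nodup) (q : String → Bool)
    (hmem : ∀ k, k ∈ S ↔ (k ∈ base ∧ q k = true)) :
    PySem.List.sorted S (fun x => x) false
      = (PySem.List.sorted base (fun x => x) false).filter q := by
  have hBsorted : (PySem.List.sorted base (fun x => x) false).Pairwise (· < ·) := by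
    have h := PySem.List.sorted_ofList_pairwise_lt (xs := base)
    rwa [PySem.Set.ofList_eq_self_of_nodup _ hbase] at h
  have hperm : ((PySem.List.sorted base (fun x => x) false).filter q).Perm S := by
    refine (List.perm_ext_iff_of_nodup (List.Sublist.nodup (List.filter_sublist) ((PySem.List.sorted_perm _ _ _).symm.nodup hbase)) hSn).mpr ?_
    intro k
    simp only [List.mem_filter, PySem.List.mem_sorted, hmem k]
  exact PySem.List.sorted_eq_of_perm_of_pairwise_lt _ _ _ hperm (List.Pairwise.sublist List.filter_sublist hBsorted)

theorem pv_main (current : List (String × List (String × String))) (lock : List (String × List (String × List (String × String)))) :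
    compare_lock_py current lock = compare_lock_py_alt current lock := by
  set lv := ((PySem.Dict.mk lock).get? "versions").getD [] with hlv
  set C : PySem.Set String := PySem.Set.ofList ((PySem.Dict.mk current).keys) with hC
  set L : PySem.Set String := PySem.Set.ofList ((PySem.Dict.mk lv).keys) with hL
  have hCn : C.Nodup := PySem.Set.nodup_ofList _
  have hLn : L.Nodup := PySem.Set.nodup_ofList _
  set cs := PySem.List.sorted C (fun x => x) false with hcs
  set ls := PySem.List.sorted L (fun x => x) false with hls
  have hcsp : cs.Pairwise (· < ·) := by
    have h := PySem.List.sorted_ofList_pairwise_lt (xs := C)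
    rwa [PySem.Set.ofList_eq_self_of_nodup _ hCn] at h
  have hlsp : ls.Pairwise (· < ·) := by
    have h := PySem.List.sorted_ofList_pairwise_lt (xs := L)
    rwa [PySem.Set.ofList_eq_self_of_nodup _ hLn] at h
  have hmemc : ∀ k, (cs.contains k = true) ↔ k ∈ C := fun k => by
    rw [List.contains_iff_mem, hcs, PySem.List.mem_sorted]
  have hmeml : ∀ k, (ls.contains k = true) ↔ k ∈ L := fun k => by
    rw [List.contains_iff_mem, hls, PySem.List.mem_sorted]
  have hmerge := pv_merge_eq current lv cs ls ([], [], []) hcsp hlsp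
  simp only [List.nil_append] at hmerge
  have hmiss : PySem.List.sorted (PySem.Set.diff L C) (fun x => x) false
      = ls.filter (fun k => !cs.contains k) := by
    refine pv_sorted_filter L hLn _ (PySem.Set.nodup_diff _ _ hLn) _ ?_
    intro k
    rw [PySem.Set.mem_diff]
    constructor
    · rintro ⟨ha, hb⟩
      refine ⟨ha, ?_⟩
      cases hcc : cs.contains k
      · rfl
      · exact absurd ((hmemc k).mp hcc) hb
    · rintro ⟨ha, hb⟩
      refine ⟨ha, fun hk => ?_⟩
      rw [← hmemc k] at hk
      rw [hk] at hb
      exact Bool.false_ne_true hb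
  have hextra : PySem.List.sorted (PySem.Set.diff C L) (fun x => x) false
      = cs.filter (fun k => !ls.contains k) := by
    refine pv_sorted_filter C hCn _ (PySem.Set.nodup_diff _ _ hCn) _ ?_
    intro k
    rw [PySem.Set.mem_diff]
    constructor
    · rintro ⟨ha, hb⟩
      refine ⟨ha, ?_⟩
      cases hcc : ls.contains k
      · rfl
      · exact absurd ((hmeml k).mp hcc) hb
    · rintro ⟨ha, hb⟩
      refine ⟨ha, fun hk => ?_⟩
      rw [← hmeml k] at hk
      rw [hk] at hb
      exact Bool.false_ne_true hb
  have hshared : PySem.List.sorted (PySem.Set.inter C L) (fun x => x) false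
      = cs.filter (fun k => ls.contains k) := by
    refine pv_sorted_filter C hCn _ (PySem.Set.nodup_inter _ _ hCn) _ ?_
    intro k
    rw [PySem.Set.mem_inter, hmeml k]
  simp only [compare_lock_py, compare_lock_py_alt, ← hlv, ← hC, ← hL, ← hcs, ← hls]
  rw [pv_foldA, hmerge, hmiss, hextra, hshared]

-- ===== VERDICT (by name: the statement is the Claim_ definition above) =====
theorem compare_lock_py_spec : Claim_equal_compare_lock_py := fun current lock _ => pv_main current lock
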